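-- pv_equiv track=rewrite | github.com/Concept-V/lobe-chat | plugins/project-vi/api/backup/2024-12-02_12-14-31/coordinator.py | _monitor_progress
-- ===== SOURCE A (Python) =====
-- from typing import Dict, List, Optional
--
-- def _monitor_progress(batch_statuses: Dict[str, str]) -> Dict:
--     """Monitor progress of work across agent pools."""
--     completed = sum(1 for status in batch_statuses.values() if status == "completed")
--     in_progress = sum(1 for status in batch_statuses.values() if status == "in_progress")
--     pending = sum(1 for status in batch_statuses.values() if status == "pending")
--
--     return {
--         "completed": completed,
--         "in_progress": in_progress,
--         "pending": pending,
--         "total": len(batch_statuses)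
--     }
-- ===== SOURCE B (Python) =====
-- from typing import Dict, List, Optional
--
-- def _monitor_progress(batch_statuses: Dict[str, str]) -> Dict:
--     """Monitor progress of work across agent pools (single pass)."""
--     completed = in_progress = pending = 0
--     for status in batch_statuses.values():
--         if status == "completed":
--             completed += 1
--         elif status == "in_progress":
--             in_progress += 1
--         elif status == "pending":
--             pending += 1
--     return {
--         "completed": completed,
--         "in_progress": in_progress,
--         "pending": pending,
--         "total": len(batch_statuses)
--     }
-- ===== Notes on version B (the rewrite author's own statement) =====
-- stated objective: simpler
-- what changed: Replaces three separate generator-expression scans over the values with one explicit loop carrying three accumulators.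
import Mathlib
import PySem

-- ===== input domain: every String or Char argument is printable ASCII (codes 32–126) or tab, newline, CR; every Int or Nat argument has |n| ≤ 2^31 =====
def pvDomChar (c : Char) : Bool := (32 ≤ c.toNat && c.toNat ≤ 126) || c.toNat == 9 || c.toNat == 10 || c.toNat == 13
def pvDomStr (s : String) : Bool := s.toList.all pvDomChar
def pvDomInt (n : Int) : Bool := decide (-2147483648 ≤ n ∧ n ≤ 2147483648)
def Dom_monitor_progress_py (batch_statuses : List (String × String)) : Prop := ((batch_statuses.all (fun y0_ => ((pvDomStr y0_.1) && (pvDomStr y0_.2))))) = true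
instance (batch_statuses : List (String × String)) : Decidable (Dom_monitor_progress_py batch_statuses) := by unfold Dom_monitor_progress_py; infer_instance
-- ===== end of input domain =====

-- B replaces A's three separate scans of the values with one loop carrying three accumulators (objective: simpler).
-- ===== PORT A =====
def monitor_progress_py (batch_statuses : List (String × String)) : List (String × Int) :=
  let d := PySem.Dict.ofList batch_statuses
  let completed := d.values.foldl (fun acc status => if status = "completed" then acc + 1 else acc) (0 : Int)
  let in_progress := d.values.foldl (fun acc status => if status = "in_progress" then acc + 1 else acc) (0 : Int)
  let pending := d.values.foldl (fun acc status => if status = "pending" then acc + 1 else acc) (0 : Int)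
  [("completed", completed), ("in_progress", in_progress), ("pending", pending), ("total", (d.size : Int))]

-- ===== PORT B =====
def monitor_progress_py_alt (batch_statuses : List (String × String)) : List (String × Int) :=
  let d := PySem.Dict.ofList batch_statuses
  let acc := d.values.foldl
    (fun (a : Int × Int × Int) status =>
      if status = "completed" then (a.1 + 1, a.2.1, a.2.2)
      else if status = "in_progress" then (a.1, a.2.1 + 1, a.2.2)
      else if status = "pending" then (a.1, a.2.1, a.2.2 + 1)
      else a)
    ((0 : Int), (0 : Int), (0 : Int))
  [("completed", acc.1), ("in_progress", acc.2.1), ("pending", acc.2.2), ("total", (d.size : Int))]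

-- ===== PRECONDITION & SPEC =====
def Spec_monitor_progress_py (batch_statuses : List (String × String)) (out : List (String × Int)) : Prop := out = monitor_progress_py_alt batch_statuses
instance (batch_statuses : List (String × String)) (out : List (String × Int)) : Decidable (Spec_monitor_progress_py batch_statuses out) := by unfold Spec_monitor_progress_py; infer_instance

-- ===== CLAIM (what is proved, stated in full; the proofs are below) =====
def Claim_equal_monitor_progress_py : Prop := ∀ (batch_statuses : List (String × String)), Dom_monitor_progress_py batch_statuses → Spec_monitor_progress_py batch_statuses (monitor_progress_py batch_statuses)

-- ===== LEMMAS AND PROOFS =====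

-- ===== VERDICT (by name: the statement is the Claim_ definition above) =====
lemma triple_fold (vals : List String) (c i p : Int) :
    vals.foldl
      (fun (a : Int × Int × Int) status =>
        if status = "completed" then (a.1 + 1, a.2.1, a.2.2)
        else if status = "in_progress" then (a.1, a.2.1 + 1, a.2.2)
        else if status = "pending" then (a.1, a.2.1, a.2.2 + 1)
        else a)
      (c, i, p)
    = (vals.foldl (fun acc status => if status = "completed" then acc + 1 else acc) c,
       vals.foldl (fun acc status => if status = "in_progress" then acc + 1 else acc) i,
       vals.foldl (fun acc status => if status = "pending" then acc + 1 else acc) p) := by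
  induction vals generalizing c i p with
  | nil => rfl
  | cons v vs ih =>
    simp only [List.foldl]
    by_cases h1 : v = "completed" <;> by_cases h2 : v = "in_progress" <;>
      by_cases h3 : v = "pending" <;> simp_all

-- ===== VERDICT (by name: the statement is the Claim_ definition above) =====
theorem monitor_progress_py_spec : Claim_equal_monitor_progress_py := by
  intro bs _
  unfold Spec_monitor_progress_py monitor_progress_py monitor_progress_py_alt
  simp only [triple_fold]
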